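-- pv_equiv track=rewrite | github.com/tchlux/fmodpy | fmodpy/parsing/util.py | pop_group
-- ===== SOURCE A (Python) =====
-- def pop_group(list_str, open_with="(", close_with=")"):
--     group = []
--     # Get the first element of the string (open the group, if matched).
--     if ((len(list_str) > 0) and (list_str[0] == open_with)):
--         list_str.pop(0)
--         num_open = 1
--     else: num_open = 0
--     # Search until the started group is closed.
--     while (num_open > 0):
--         # TOOD: Might need to raise parsing error when this happens.
--         if (len(list_str) == 0): raise(NotImplementedError)
--         next_value = list_str.pop(0)
--         if   (next_value == open_with):  num_open += 1
--         elif (next_value == close_with): num_open -= 1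
--         if (num_open != 0): group.append(next_value)
--     # Return the captured portion and the remaining.
--     return group, list_str
-- ===== SOURCE B (Python) =====
-- def pop_group(list_str, open_with="(", close_with=")"):
--     # No group opened: nothing to pop.
--     if not list_str or list_str[0] != open_with:
--         return [], list_str
--     depth = 1
--     # Single forward scan tracking nesting depth.
--     for j, t in enumerate(list_str[1:]):
--         if t == open_with:
--             depth += 1
--         elif t == close_with:
--             depth -= 1
--             if depth == 0:
--                 group = list_str[1:j + 1]
--                 del list_str[:j + 2]
--                 return group, list_str
--     raise NotImplementedError
-- ===== Notes on version B (the rewrite author's own statement) =====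
-- stated objective: alternative
-- what changed: Replaces the destructive pop(0)-per-token while-loop carrying num_open and an append accumulator with a single indexed depth-tracking scan over list_str[1:] that locates the closing token, then slices the group out and deletes the consumed prefix in one step.
import Mathlib
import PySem

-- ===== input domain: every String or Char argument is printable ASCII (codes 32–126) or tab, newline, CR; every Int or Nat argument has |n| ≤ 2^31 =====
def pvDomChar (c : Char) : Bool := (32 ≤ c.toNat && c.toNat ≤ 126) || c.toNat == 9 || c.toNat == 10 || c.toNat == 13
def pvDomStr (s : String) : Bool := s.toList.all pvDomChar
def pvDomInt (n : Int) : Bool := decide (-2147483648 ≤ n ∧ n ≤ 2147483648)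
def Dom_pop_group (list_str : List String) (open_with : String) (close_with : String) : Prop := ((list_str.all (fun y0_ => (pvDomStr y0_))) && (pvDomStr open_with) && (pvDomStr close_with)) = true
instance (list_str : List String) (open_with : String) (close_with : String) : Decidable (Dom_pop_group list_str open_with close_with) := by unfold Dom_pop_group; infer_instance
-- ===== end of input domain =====

-- B replaces A's pop(0)-per-token while-loop with a single depth-tracking index
-- scan plus one slice/delete; return-value equivalence proved on Pre_ (the inputs
-- where Python A returns; it raises NotImplementedError otherwise).
-- Both Pythons also mutate list_str identically wherever A returns.


-- ===== PORT A =====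
-- A's while-loop: pop the head, adjust num_open, append unless the group just
-- closed.  Where Python raises (list exhausted with num_open > 0) the port
-- returns (group, []) — excluded by Pre_pop_group.
def popGroupLoop (l : List String) (o c : String) (numOpen : Int) (group : List String) :
    List String × List String :=
  if numOpen > 0 then
    match l with
    | [] => (group, [])  -- Python: raise NotImplementedError (outside Pre_)
    | v :: rest =>
      let n' := if v = o then numOpen + 1 else if v = c then numOpen - 1 else numOpen
      popGroupLoop rest o c n' (if n' ≠ 0 then group ++ [v] else group)
  else (group, l)

def pop_group (list_str : List String) (open_with : String) (close_with : String) :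
    List String × List String :=
  match list_str with
  | [] => ([], [])
  | x :: rest =>
    if x = open_with then popGroupLoop rest open_with close_with 1 []
    else ([], x :: rest)

-- ===== PORT B =====
-- Source B's for-loop over enumerate(list_str[1:]): returns the relative index of the
-- token that closes the group, or none (Python: raise, outside Pre_).
def scanLoop (tail : List String) (o c : String) (depth : Int) (j : Nat) : Option Nat :=
  match tail with
  | [] => none
  | t :: rest =>
    if t = o then scanLoop rest o c (depth + 1) (j + 1)
    else if t = c then
      if depth - 1 = 0 then some j else scanLoop rest o c (depth - 1) (j + 1)
    else scanLoop rest o c depth (j + 1)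

def pop_group_alt (list_str : List String) (open_with : String) (close_with : String) :
    List String × List String :=
  match list_str with
  | [] => ([], [])
  | x :: rest =>
    if x = open_with then
      match scanLoop rest open_with close_with 1 0 with
      | some j => (rest.take j, rest.drop (j + 1))  -- list_str[1:j+1], list_str[j+2:]
      | none => ([], [])  -- Python: raise NotImplementedError (outside Pre_)
    else ([], x :: rest)

-- ===== PRECONDITION & SPEC =====
-- closes-count helper for Pre_: A's elif counts a token as a close only when it is
-- not an open, so with open_with = close_with no token ever closes.
def pvCloseCnt (o c : String) (s : List String) : Int :=
  if o = c then 0 else (s.count c : Int)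

-- Pre_ = exactly the inputs on which Python A returns: either no group is opened,
-- or some prefix of the tail brings the nesting depth back to zero.
def Pre_pop_group (list_str : List String) (open_with : String) (close_with : String) : Prop :=
  list_str = [] ∨ list_str.head? ≠ some open_with ∨
    ∃ j < list_str.length - 1,
      (1 : Int) + (((list_str.drop 1).take (j + 1)).count open_with : Int)
        - pvCloseCnt open_with close_with ((list_str.drop 1).take (j + 1)) = 0
instance (list_str : List String) (open_with : String) (close_with : String) :
    Decidable (Pre_pop_group list_str open_with close_with) := by
  unfold Pre_pop_group; infer_instance

def pvWitness_pop_group : List String × String × String := (["(", "a", ")"], "(", ")")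

def Spec_pop_group (list_str : List String) (open_with : String) (close_with : String) (out : List String × List String) : Prop := out = pop_group_alt list_str open_with close_with
instance (list_str : List String) (open_with : String) (close_with : String) (out : List String × List String) : Decidable (Spec_pop_group list_str open_with close_with out) := by unfold Spec_pop_group; infer_instance

-- ===== CLAIM (what is proved, stated in full; the proofs are below) =====
def Claim_equal_pop_group : Prop := ∀ (list_str : List String) (open_with : String) (close_with : String), Dom_pop_group list_str open_with close_with → Pre_pop_group list_str open_with close_with → Spec_pop_group list_str open_with close_with (pop_group list_str open_with close_with)

-- ===== LEMMAS AND PROOFS =====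

-- depth contribution of one token (proof-only helper)
def depthDelta (o c t : String) : Int := if t = o then 1 else if t = c then -1 else 0

theorem depth_cons (o c t : String) (s : List String) :
    (((t :: s).count o : Int) - pvCloseCnt o c (t :: s))
      = depthDelta o c t + ((s.count o : Int) - pvCloseCnt o c s) := by
  unfold pvCloseCnt depthDelta
  by_cases ho : t = o
  · by_cases hoc : o = c
    · simp [ho, hoc]; ring
    · have hc : ¬ c = t := fun h => hoc (ho ▸ h.symm)
      simp [ho, hoc, hc]; ring
  · by_cases hc : t = c
    · have hoc : ¬ o = c := fun h => ho (hc.trans h.symm)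
      have hco : ¬ c = o := fun h => hoc h.symm
      simp [hc, hoc, hco]
      ring
    · by_cases hoc : o = c <;>
        simp [ho, hc, hoc, fun h : o = t => ho h.symm, fun h : c = t => hc h.symm]

-- scanLoop's index accumulator only shifts the answer.
theorem scanLoop_shift (tail : List String) (o c : String) :
    ∀ (d : Int) (j0 : Nat), scanLoop tail o c d j0 = (scanLoop tail o c d 0).map (· + j0) := by
  induction tail with
  | nil => intro d j0; simp [scanLoop]
  | cons t rest ih =>
    intro d j0
    rw [scanLoop, scanLoop]
    by_cases ho : t = o
    · rw [if_pos ho, if_pos ho, ih _ (j0 + 1), ih _ 1]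
      cases scanLoop rest o c (d + 1) 0 <;> simp <;> omega
    · rw [if_neg ho, if_neg ho]
      by_cases hc : t = c
      · rw [if_pos hc, if_pos hc]
        by_cases hd : d - 1 = 0
        · rw [if_pos hd, if_pos hd]; simp
        · rw [if_neg hd, if_neg hd, ih _ (j0 + 1), ih _ 1]
          cases scanLoop rest o c (d - 1) 0 <;> simp <;> omega
      · rw [if_neg hc, if_neg hc, ih _ (j0 + 1), ih _ 1]
        cases scanLoop rest o c d 0 <;> simp <;> omega

-- If the scan finds no closing token, no prefix of the tail brings the depth to 0.
theorem scanLoop_none (o c : String) (tail : List String) :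
    ∀ (d : Int) (j0 : Nat), 0 < d → scanLoop tail o c d j0 = none →
      ∀ j < tail.length,
        d + ((tail.take (j + 1)).count o : Int) - pvCloseCnt o c (tail.take (j + 1)) ≠ 0 := by
  induction tail with
  | nil => intro d j0 _ _ j hj; simp at hj
  | cons t rest ih =>
    intro d j0 hd hnone j hj
    rw [scanLoop] at hnone
    have hnil : ((List.count o ([] : List String) : Int) - pvCloseCnt o c []) = 0 := by
      simp [pvCloseCnt]
    have key : ∀ s : List String, d + ((t :: s).count o : Int) - pvCloseCnt o c (t :: s)
        = (d + depthDelta o c t) + (((s.count o : Int)) - pvCloseCnt o c s) := by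
      intro s; have := depth_cons o c t s; omega
    have hj' : ∀ j', j = j' + 1 → j' < rest.length := by
      intro j' hjj; simp [List.length_cons] at hj; omega
    rw [List.take_succ_cons, key (rest.take j)]
    by_cases ho : t = o
    · rw [if_pos ho] at hnone
      have hδ : depthDelta o c t = 1 := by unfold depthDelta; rw [if_pos ho]
      cases j with
      | zero => rw [List.take_zero]; rw [hδ]; omega
      | succ j' =>
        have := ih (d + 1) (j0 + 1) (by omega) hnone j' (hj' j' rfl)
        rw [hδ]; omega
    · rw [if_neg ho] at hnone
      by_cases hc : t = c
      · rw [if_pos hc] at hnone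
        by_cases hd1 : d - 1 = 0
        · rw [if_pos hd1] at hnone; exact absurd hnone (by simp)
        · rw [if_neg hd1] at hnone
          have hδ : depthDelta o c t = -1 := by unfold depthDelta; rw [if_neg ho, if_pos hc]
          cases j with
          | zero => rw [List.take_zero]; rw [hδ]; omega
          | succ j' =>
            have := ih (d - 1) (j0 + 1) (by omega) hnone j' (hj' j' rfl)
            rw [hδ]; omega
      · rw [if_neg hc] at hnone
        have hδ : depthDelta o c t = 0 := by unfold depthDelta; rw [if_neg ho, if_neg hc]
        cases j with
        | zero => rw [List.take_zero]; rw [hδ]; omega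
        | succ j' =>
          have := ih d (j0 + 1) hd hnone j' (hj' j' rfl)
          rw [hδ]; omega

theorem popGroupLoop_stop (o c : String) (l : List String) (n : Int) (g : List String)
    (h : ¬ n > 0) : popGroupLoop l o c n g = (g, l) := by
  cases l <;> rw [popGroupLoop, if_neg h]

-- A's pop-loop computes exactly what B's scan describes.
theorem loop_eq (o c : String) (tail : List String) :
    ∀ (d : Int) (g : List String), 0 < d →
      popGroupLoop tail o c d g =
        match scanLoop tail o c d 0 with
        | some k => (g ++ tail.take k, tail.drop (k + 1))
        | none => (g ++ tail, []) := by
  induction tail with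
  | nil => intro d g hd; rw [popGroupLoop, if_pos hd]; simp [scanLoop]
  | cons t rest ih =>
    intro d g hd
    rw [popGroupLoop, if_pos hd]
    simp only []
    by_cases ho : t = o
    · rw [if_pos ho]
      have h2 : (d + 1 ≠ 0) := by omega
      rw [if_pos h2, ih (d + 1) (g ++ [t]) (by omega)]
      rw [scanLoop, if_pos ho, scanLoop_shift rest o c (d + 1) 1]
      cases scanLoop rest o c (d + 1) 0 with
      | none => simp
      | some k => simp
    · rw [if_neg ho]
      by_cases hc : t = c
      · rw [if_pos hc]
        by_cases hd1 : d - 1 = 0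
        · have h2 : ¬ (d - 1 ≠ 0) := by omega
          rw [if_neg h2]
          rw [popGroupLoop_stop o c rest (d - 1) g (by omega)]
          rw [scanLoop, if_neg ho, if_pos hc, if_pos hd1]
          simp
        · rw [if_pos hd1, ih (d - 1) (g ++ [t]) (by omega)]
          rw [scanLoop, if_neg ho, if_pos hc, if_neg hd1,
            scanLoop_shift rest o c (d - 1) 1]
          cases scanLoop rest o c (d - 1) 0 with
          | none => simp
          | some k => simp
      · rw [if_neg hc]
        have h2 : (d ≠ 0) := by omega
        rw [if_pos h2, ih d (g ++ [t]) hd]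
        rw [scanLoop, if_neg ho, if_neg hc, scanLoop_shift rest o c d 1]
        cases scanLoop rest o c d 0 with
        | none => simp
        | some k => simp

-- ===== VERDICT (by name: the statement is the Claim_ definition above) =====
theorem pop_group_spec : Claim_equal_pop_group := by
  intro l o c _ hpre
  unfold Spec_pop_group
  cases l with
  | nil => rfl
  | cons x rest =>
    by_cases hx : x = o
    · simp only [pop_group, pop_group_alt, if_pos hx]
      rw [loop_eq o c rest 1 [] (by norm_num)]
      cases hscan : scanLoop rest o c 1 0 with
      | some k => simp
      | none =>
        exfalso
        rcases hpre with h | h | ⟨j, hj, hdepth⟩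
        · exact (List.cons_ne_nil _ _) h
        · exact h (by simp [hx])
        · exact scanLoop_none o c rest 1 0 (by norm_num) hscan j (by simpa using hj)
            (by simpa using hdepth)
    · simp [pop_group, pop_group_alt, if_neg hx]
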